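-- pv_equiv track=rewrite | github.com/GiangHo/CodeFight | 57_file_naming.py | fileNaming
-- ===== SOURCE A (Python) =====
-- def fileNaming(names):
--     file_name = []
--     dict_name = {}
--     for i in names:
--         if dict_name.get(i) == None:
--             file_name.append(i)
--             dict_name[i] = 1
--         else:
--             new_name = i+ "("+str(dict_name.get(i))+")"
--             while dict_name.get(new_name) != None:
--                 dict_name[i] = dict_name[i] + 1
--                 new_name = i + "(" + str(dict_name.get(i)) + ")"
--
--             file_name.append(new_name)
--             dict_name[i] = dict_name[i] + 1
--             dict_name[new_name] = 1
--     return  (file_name)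
-- ===== SOURCE B (Python) =====
-- def fileNaming(names):
--     used = set()
--     result = []
--     for name in names:
--         if name in used:
--             k = 1
--             while name + "(" + str(k) + ")" in used:
--                 k += 1
--             chosen = name + "(" + str(k) + ")"
--         else:
--             chosen = name
--         result.append(chosen)
--         used.add(chosen)
--     return result
-- ===== Notes on version B (the rewrite author's own statement) =====
-- stated objective: simpler
-- what changed: A memoizes a per-base next-suffix counter in a dict (also storing every emitted name as a key); B keeps only a set of used names and rescans suffixes from 1 on each collision, so the counter bookkeeping disappears.
import Mathlib
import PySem

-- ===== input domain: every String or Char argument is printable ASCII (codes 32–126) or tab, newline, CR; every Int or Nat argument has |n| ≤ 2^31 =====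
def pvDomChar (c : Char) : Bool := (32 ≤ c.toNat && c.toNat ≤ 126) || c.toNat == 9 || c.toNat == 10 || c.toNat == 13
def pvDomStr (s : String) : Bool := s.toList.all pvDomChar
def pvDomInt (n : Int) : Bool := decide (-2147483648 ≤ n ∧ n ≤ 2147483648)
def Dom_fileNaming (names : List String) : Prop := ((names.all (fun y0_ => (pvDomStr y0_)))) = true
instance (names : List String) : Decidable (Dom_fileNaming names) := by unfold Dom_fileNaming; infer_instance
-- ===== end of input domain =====

-- B replaces A's per-base memoized counter dictionary by a single set of used names,
-- rescanning suffixes from 1 on each collision (objective: simpler; not faster).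


-- the candidate string  i + "(" + str(c) + ")"  both Pythons build (built on List Char; exact for ASCII and beyond)
def pvCand (i : String) (c : Int) : String := String.ofList (i.toList ++ '(' :: PySem.Int.toChars c ++ [')'])

-- ===== PORT A =====
-- the inner 'while dict_name.get(new_name) != None' loop; fuel (size+1) only makes it total, it is never exhausted
def fileNamingWhile (i : String) : Nat → PySem.Dict String Int → String → PySem.Dict String Int × String
  | 0, d, nn => (d, nn)
  | fuel+1, d, nn =>
    if (d.get? nn).isSome then
      let d' := d.insert i (d.getD i 0 + 1)
      fileNamingWhile i fuel d' (pvCand i (d'.getD i 0))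
    else (d, nn)

def fileNamingStep (st : List String × PySem.Dict String Int) (i : String) :
    List String × PySem.Dict String Int :=
  match st.2.get? i with
  | none => (st.1 ++ [i], st.2.insert i 1)
  | some v =>
    match fileNamingWhile i (st.2.size + 1) st.2 (pvCand i v) with
    | (d', nn) => (st.1 ++ [nn], (d'.insert i (d'.getD i 0 + 1)).insert nn 1)

def fileNaming (names : List String) : List String :=
  (names.foldl fileNamingStep ([], PySem.Dict.empty)).1

-- ===== PORT B =====
-- the inner 'while name + "(" + str(k) + ")" in used' loop; fuel (len(used)+1) only makes it total
def fileNamingAltWhile (used : PySem.Set String) (name : String) : Nat → Int → Int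
  | 0, k => k
  | fuel+1, k => if PySem.Set.contains used (pvCand name k) then fileNamingAltWhile used name fuel (k+1) else k

def fileNamingAltStep (st : List String × PySem.Set String) (name : String) :
    List String × PySem.Set String :=
  let chosen :=
    if PySem.Set.contains st.2 name then
      pvCand name (fileNamingAltWhile st.2 name (st.2.length + 1) 1)
    else name
  (st.1 ++ [chosen], PySem.Set.add st.2 chosen)

def fileNaming_alt (names : List String) : List String :=
  (names.foldl fileNamingAltStep ([], PySem.Set.empty)).1

-- ===== PRECONDITION & SPEC =====
def Spec_fileNaming (names : List String) (out : List String) : Prop := out = fileNaming_alt names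
instance (names : List String) (out : List String) : Decidable (Spec_fileNaming names out) := by unfold Spec_fileNaming; infer_instance

-- ===== CLAIM (what is proved, stated in full; the proofs are below) =====
def Claim_equal_fileNaming : Prop := ∀ (names : List String), Dom_fileNaming names → Spec_fileNaming names (fileNaming names)

-- ===== LEMMAS AND PROOFS =====

lemma pv_digitChar_inj {a b : Nat} (ha : a < 10) (hb : b < 10)
    (h : Nat.digitChar a = Nat.digitChar b) : a = b := by
  have key : ∀ a b : Fin 10, Nat.digitChar a.val = Nat.digitChar b.val → a = b := by decide
  have := key ⟨a, ha⟩ ⟨b, hb⟩ h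
  exact congrArg Fin.val this

lemma pv_toDigitsCore_eq (fuel : Nat) : ∀ (n : Nat) (acc : List Char), 0 < n → n < 10 ^ fuel →
    Nat.toDigitsCore 10 fuel n acc = ((Nat.digits 10 n).map Nat.digitChar).reverse ++ acc := by
  induction fuel with
  | zero => intro n acc h1 h2; simp at h2; omega
  | succ f ih =>
    intro n acc h1 h2
    by_cases h : n / 10 = 0
    · have hn : n < 10 := by omega
      have hmod : n % 10 = n := Nat.mod_eq_of_lt hn
      rw [Nat.digits_def' (by norm_num) h1, h]
      simp [Nat.toDigitsCore, h, hmod]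
    · have h1' : 0 < n / 10 := Nat.pos_of_ne_zero h
      have h2' : n / 10 < 10 ^ f := by
        rw [pow_succ] at h2
        exact Nat.div_lt_of_lt_mul (by omega)
      rw [Nat.digits_def' (by norm_num) h1]
      simp only [Nat.toDigitsCore, h]
      rw [ih (n / 10) _ h1' h2']
      simp

lemma pv_map_digitChar_inj : ∀ (l1 l2 : List Nat), (∀ x ∈ l1, x < 10) → (∀ x ∈ l2, x < 10) →
    l1.map Nat.digitChar = l2.map Nat.digitChar → l1 = l2 := by
  intro l1
  induction l1 with
  | nil => intro l2 _ _ h; cases l2 <;> simp_all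
  | cons x t ih =>
    intro l2 h1 h2 h
    cases l2 with
    | nil => simp_all
    | cons y t2 =>
      simp only [List.map_cons, List.cons.injEq] at h
      have hx := pv_digitChar_inj (h1 x (by simp)) (h2 y (by simp)) h.1
      have ht := ih t2 (fun z hz => h1 z (by simp [hz])) (fun z hz => h2 z (by simp [hz])) h.2
      simp [hx, ht]

lemma pv_toChars_inj {a b : Int} (ha : 1 ≤ a) (hb : 1 ≤ b)
    (h : PySem.Int.toChars a = PySem.Int.toChars b) : a = b := by
  have hna : ¬ a < 0 := by omega
  have hnb : ¬ b < 0 := by omega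
  have bound : ∀ n : Nat, n < 10 ^ (n + 1) := by
    intro n
    calc n < 10 ^ n := Nat.lt_pow_self (by norm_num)
    _ ≤ 10 ^ (n + 1) := Nat.pow_le_pow_right (by norm_num) (by omega)
  have hpa : 0 < a.toNat := by omega
  have hpb : 0 < b.toNat := by omega
  simp only [PySem.Int.toChars, hna, hnb, if_false, Nat.toDigits] at h
  rw [pv_toDigitsCore_eq _ _ _ hpa (bound _), pv_toDigitsCore_eq _ _ _ hpb (bound _)] at h
  simp only [List.append_nil, List.reverse_inj] at h
  have hd : Nat.digits 10 a.toNat = Nat.digits 10 b.toNat :=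
    pv_map_digitChar_inj _ _ (fun x hx => Nat.digits_lt_base (by norm_num) hx)
      (fun x hx => Nat.digits_lt_base (by norm_num) hx) h
  have : a.toNat = b.toNat := by
    rw [← Nat.ofDigits_digits 10 a.toNat, ← Nat.ofDigits_digits 10 b.toNat, hd]
  omega

lemma pv_cand_inj {i : String} {a b : Int} (ha : 1 ≤ a) (hb : 1 ≤ b)
    (h : pvCand i a = pvCand i b) : a = b := by
  unfold pvCand at h
  have h2 : i.toList ++ '(' :: PySem.Int.toChars a ++ [')']
      = i.toList ++ '(' :: PySem.Int.toChars b ++ [')'] := by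
    have := congrArg String.toList h
    simpa using this
  have h3 : i.toList ++ '(' :: PySem.Int.toChars a = i.toList ++ '(' :: PySem.Int.toChars b :=
    List.append_cancel_right h2
  have h4 := List.append_cancel_left h3
  exact pv_toChars_inj ha hb ((List.cons.injEq _ _ _ _).mp h4).2

lemma pv_cand_range_nodup (i : String) (v : Int) (hv : 1 ≤ v) (m : Nat) :
    ((List.range m).map (fun e : Nat => pvCand i (v + (e : Int)))).Nodup := by
  refine List.Nodup.map_on ?_ (List.nodup_range)
  intro x hx y hy h
  have hx1 : (1:Int) ≤ v + x := by omega
  have hy1 : (1:Int) ≤ v + y := by omega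
  have := pv_cand_inj hx1 hy1 h
  omega

lemma pv_exists_free (S : List String) (i : String) (v : Int) (hv : 1 ≤ v) :
    ∃ e : Nat, pvCand i (v + e) ∉ S := by
  by_contra hc
  rw [not_exists] at hc
  simp only [not_not] at hc
  have hsub : ((List.range (S.length + 1)).map (fun e : Nat => pvCand i (v + (e : Int)))) ⊆ S := by
    intro x hx
    simp only [List.mem_map, List.mem_range] at hx
    obtain ⟨e, _, rfl⟩ := hx
    exact hc e
  have hlen := ((pv_cand_range_nodup i v hv _).subperm hsub).length_le
  rw [List.length_map, List.length_range] at hlen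
  omega

lemma pv_used_le (S : List String) (i : String) (v : Int) (hv : 1 ≤ v)
    (F : Nat) (hall : ∀ e : Nat, e < F → pvCand i (v + e) ∈ S) : F ≤ S.length := by
  have hsub : ((List.range F).map (fun e : Nat => pvCand i (v + (e : Int)))) ⊆ S := by
    intro x hx
    simp only [List.mem_map, List.mem_range] at hx
    obtain ⟨e, he, rfl⟩ := hx
    exact hall e he
  have hlen := ((pv_cand_range_nodup i v hv _).subperm hsub).length_le
  rw [List.length_map, List.length_range] at hlen
  exact hlen

lemma pv_contains_of_get? {d : PySem.Dict String Int} {k : String} {v : Int}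
    (h : d.get? k = some v) : d.contains k = true := by
  by_cases hc : d.contains k = true
  · exact hc
  · have := (PySem.Dict.get?_eq_none_iff_contains d k).mpr (by simpa using hc)
    rw [this] at h; cases h

lemma pv_getD_of_get? {d : PySem.Dict String Int} {k : String} {v : Int}
    (h : d.get? k = some v) : d.getD k 0 = v := by
  simp [PySem.Dict.getD, h]

lemma pv_whileA_spec (i : String) : ∀ (F fuel : Nat) (d : PySem.Dict String Int) (v : Int),
    d.get? i = some v →
    pvCand i (v + F) ∉ d.keys → (∀ e : Nat, e < F → pvCand i (v + e) ∈ d.keys) → F < fuel →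
    ∃ d', fileNamingWhile i fuel d (pvCand i v) = (d', pvCand i (v + F)) ∧
      d'.get? i = some (v + F) ∧ d'.keys = d.keys ∧ ∀ s, s ≠ i → d'.get? s = d.get? s := by
  intro F
  induction F with
  | zero =>
    intro fuel d v hv hfree _ hfuel
    obtain ⟨f, rfl⟩ : ∃ f, fuel = f + 1 := ⟨fuel - 1, by omega⟩
    have hnone : d.get? (pvCand i v) = none := by
      rw [PySem.Dict.get?_eq_none_iff_contains]
      by_cases hc : d.contains (pvCand i v) = true
      · exact absurd ((PySem.Dict.contains_iff_mem_keys d _).mp hc) (by simpa using hfree)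
      · simpa using hc
    refine ⟨d, ?_, by simpa using hv, rfl, fun _ _ => rfl⟩
    simp [fileNamingWhile, hnone]
  | succ F ih =>
    intro fuel d v hv hfree hall hfuel
    obtain ⟨f, rfl⟩ : ∃ f, fuel = f + 1 := ⟨fuel - 1, by omega⟩
    have hmem0 : pvCand i v ∈ d.keys := by simpa using hall 0 (by omega)
    have hsome : (d.get? (pvCand i v)).isSome = true := by
      rcases hh : d.get? (pvCand i v) with _ | w
      · exact absurd hmem0 (by
          have := (PySem.Dict.get?_eq_none_iff_contains d (pvCand i v)).mp hh
          intro hmm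
          rw [(PySem.Dict.contains_iff_mem_keys d _).mpr hmm] at this
          cases this)
      · rfl
    have hgetD : d.getD i 0 = v := pv_getD_of_get? hv
    have hcont : d.contains i = true := pv_contains_of_get? hv
    have harith : v + 1 + (F : Int) = v + ((F + 1 : Nat) : Int) := by push_cast; ring
    have hkeys' : (d.insert i (v + 1)).keys = d.keys := PySem.Dict.keys_insert_of_contains d _ hcont
    obtain ⟨d'', heq, hgi, hk, ho⟩ := ih f (d.insert i (v + 1)) (v + 1)
      (PySem.Dict.get?_insert_self d i (v + 1))
      (by rw [hkeys', harith]; exact hfree)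
      (by intro e he
          rw [hkeys']
          have : v + 1 + (e : Int) = v + ((e + 1 : Nat) : Int) := by push_cast; ring
          rw [this]
          exact hall (e + 1) (by omega))
      (by omega)
    refine ⟨d'', ?_, by rw [hgi, harith], by rw [hk, hkeys'], ?_⟩
    · rw [← harith]
      simp only [fileNamingWhile, hsome, if_true]
      rw [hgetD, PySem.Dict.getD_insert_self]
      exact heq
    · intro s hs
      rw [ho s hs, PySem.Dict.get?_insert_of_ne _ _ hs]

lemma pv_whileB_spec (used : PySem.Set String) (name : String) : ∀ (F fuel : Nat) (k : Int),
    pvCand name (k + F) ∉ used → (∀ e : Nat, e < F → pvCand name (k + e) ∈ used) → F < fuel →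
    fileNamingAltWhile used name fuel k = k + F := by
  intro F
  induction F with
  | zero =>
    intro fuel k hfree _ hfuel
    obtain ⟨f, rfl⟩ : ∃ f, fuel = f + 1 := ⟨fuel - 1, by omega⟩
    have hnc : PySem.Set.contains used (pvCand name k) = false := by
      by_cases hc : PySem.Set.contains used (pvCand name k) = true
      · exact absurd ((PySem.Set.contains_iff used _).mp hc) (by simpa using hfree)
      · simpa using hc
    simp only [fileNamingAltWhile]
    rw [if_neg (by simpa using hfree)]
    simp
  | succ F ih =>
    intro fuel k hfree hall hfuel
    obtain ⟨f, rfl⟩ : ∃ f, fuel = f + 1 := ⟨fuel - 1, by omega⟩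
    have hmem0 : pvCand name k ∈ used := by simpa using hall 0 (by omega)
    have hcont : PySem.Set.contains used (pvCand name k) = true :=
      (PySem.Set.contains_iff used _).mpr hmem0
    have harith : k + 1 + (F : Int) = k + ((F + 1 : Nat) : Int) := by push_cast; ring
    have := ih f (k + 1)
      (by rw [harith]; exact hfree)
      (by intro e he
          have h2 : k + 1 + (e : Int) = k + ((e + 1 : Nat) : Int) := by push_cast; ring
          rw [h2]
          exact hall (e + 1) (by omega))
      (by omega)
    rw [fileNamingAltWhile, hcont, if_pos rfl, this, harith]

-- A's dict invariant: keys are distinct and the memoized counter at key s only skips suffixes already used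
def pvDInv (d : PySem.Dict String Int) : Prop :=
  d.keys.Nodup ∧ ∀ s v, d.get? s = some v →
    1 ≤ v ∧ ∀ j : Int, 1 ≤ j → j < v → pvCand s j ∈ d.keys

lemma pv_main : ∀ (names acc : List String) (d : PySem.Dict String Int), pvDInv d →
    (names.foldl fileNamingStep (acc, d)).1 = (names.foldl fileNamingAltStep (acc, d.keys)).1 := by
  intro names
  induction names with
  | nil => intro acc d _; rfl
  | cons i rest ih =>
    intro acc d hInv
    obtain ⟨hnd, hval⟩ := hInv
    simp only [List.foldl_cons]
    rcases hv : d.get? i with _ | v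
    · -- first occurrence: both emit i
      have hcont : d.contains i = false := by
        have := (PySem.Dict.get?_eq_none_iff_contains d i).mp hv
        simpa using this
      have hnotmem : i ∉ d.keys := by
        intro hm
        rw [(PySem.Dict.contains_iff_mem_keys d i).mpr hm] at hcont
        cases hcont
      have hA : fileNamingStep (acc, d) i = (acc ++ [i], d.insert i 1) := by
        simp [fileNamingStep, hv]
      have hB : fileNamingAltStep (acc, d.keys) i = (acc ++ [i], d.keys ++ [i]) := by
        have hc : PySem.Set.contains d.keys i = false := by
          by_cases h : PySem.Set.contains d.keys i = true
          · exact absurd ((PySem.Set.contains_iff d.keys i).mp h) hnotmem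
          · simpa using h
        simp only [fileNamingAltStep]
        rw [if_neg (by simpa using hnotmem), PySem.Set.add_of_not_mem hnotmem]
      rw [hA, hB]
      have hkeys : (d.insert i 1).keys = d.keys ++ [i] :=
        PySem.Dict.keys_insert_of_not_contains d 1 hcont
      rw [← hkeys]
      apply ih
      constructor
      · rw [hkeys, List.nodup_append]
        exact ⟨hnd, List.nodup_singleton i, by intro a ha b hb; rw [List.mem_singleton] at hb; subst hb; exact fun h => hnotmem (h ▸ ha)⟩
      · intro s w hw
        by_cases hs : s = i
        · subst hs
          rw [PySem.Dict.get?_insert_self] at hw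
          cases hw
          exact ⟨le_refl 1, fun j h1 h2 => absurd (lt_of_le_of_lt h1 h2) (by omega)⟩
        · rw [PySem.Dict.get?_insert_of_ne _ _ hs] at hw
          obtain ⟨h1, h2⟩ := hval s w hw
          exact ⟨h1, fun j hj1 hj2 => by rw [hkeys]; exact List.mem_append_left _ (h2 j hj1 hj2)⟩
    · -- repeated name: both emit the first free candidate i(k)
      obtain ⟨hv1, hvall⟩ := hval i v hv
      have hmem : i ∈ d.keys := (PySem.Dict.contains_iff_mem_keys d i).mp (pv_contains_of_get? hv)
      have hex : ∃ e : Nat, pvCand i (v + e) ∉ d.keys := pv_exists_free d.keys i v hv1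
      set F := Nat.find hex with hF
      have hfree : pvCand i (v + F) ∉ d.keys := Nat.find_spec hex
      have hmin : ∀ e : Nat, e < F → pvCand i (v + e) ∈ d.keys := by
        intro e he
        have := Nat.find_min hex he
        simpa using this
      have hkeyslen : d.keys.length = d.size := by
        simp [PySem.Dict.keys, PySem.Dict.size]
      have hFle : F ≤ d.keys.length := pv_used_le d.keys i v hv1 F hmin
      obtain ⟨d', heq, hgi, hk, ho⟩ := pv_whileA_spec i F (d.size + 1) d v hv hfree hmin (by omega)
      have hA : fileNamingStep (acc, d) i
          = (acc ++ [pvCand i (v + F)],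
             (d'.insert i (v + F + 1)).insert (pvCand i (v + F)) 1) := by
        simp only [fileNamingStep, hv, heq]
        rw [pv_getD_of_get? hgi]
      -- B's loop from 1 reaches the same first free suffix
      have hcontB : PySem.Set.contains d.keys i = true := (PySem.Set.contains_iff d.keys i).mpr hmem
      set G : Nat := (v + F - 1).toNat with hG
      have h1G : (1 : Int) + G = v + F := by
        have : (0:Int) ≤ v + F - 1 := by omega
        omega
      have hallB : ∀ e : Nat, e < G → pvCand i (1 + e) ∈ d.keys := by
        intro e he
        by_cases hlt : (1 : Int) + e < v
        · exact hvall (1 + e) (by omega) hlt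
        · have he' : ((1 + (e:Int) - v).toNat : Int) = 1 + e - v := by omega
          have hlt2 : (1 + (e:Int) - v).toNat < F := by omega
          have := hmin _ hlt2
          rw [he'] at this
          have harg : v + (1 + (e:Int) - v) = 1 + e := by ring
          rw [harg] at this
          exact this
      have hfreeB : pvCand i ((1:Int) + G) ∉ d.keys := by rw [h1G]; exact hfree
      have hGle : G ≤ d.keys.length := pv_used_le d.keys i 1 (le_refl 1) G hallB
      have hBloop : fileNamingAltWhile d.keys i (d.keys.length + 1) 1 = v + F := by
        rw [pv_whileB_spec d.keys i G (d.keys.length + 1) 1 hfreeB hallB (by omega), h1G]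
      have hB : fileNamingAltStep (acc, d.keys) i
          = (acc ++ [pvCand i (v + F)], d.keys ++ [pvCand i (v + F)]) := by
        simp only [fileNamingAltStep]
        rw [if_pos hcontB, hBloop, PySem.Set.add_of_not_mem hfree]
      rw [hA, hB]
      -- the new dict's keys are the new used set
      have hnn_ne_i : pvCand i (v + F) ≠ i := fun h => hfree (by rw [h]; exact hmem)
      have hcont'i : d'.contains i = true := pv_contains_of_get? hgi
      have hkeys1 : (d'.insert i (v + F + 1)).keys = d.keys := by
        rw [PySem.Dict.keys_insert_of_contains d' _ hcont'i, hk]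
      have hcont2 : (d'.insert i (v + F + 1)).contains (pvCand i (v + F)) = false := by
        by_cases h : (d'.insert i (v + F + 1)).contains (pvCand i (v + F)) = true
        · have := (PySem.Dict.contains_iff_mem_keys _ _).mp h
          rw [hkeys1] at this
          exact absurd this hfree
        · simpa using h
      have hkeys2 : ((d'.insert i (v + F + 1)).insert (pvCand i (v + F)) 1).keys
          = d.keys ++ [pvCand i (v + F)] := by
        rw [PySem.Dict.keys_insert_of_not_contains _ 1 hcont2, hkeys1]
      rw [← hkeys2]
      apply ih
      constructor
      · rw [hkeys2, List.nodup_append]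
        exact ⟨hnd, List.nodup_singleton _, by intro a ha b hb; rw [List.mem_singleton] at hb; subst hb; exact fun h => hfree (h ▸ ha)⟩
      · intro s w hw
        by_cases hs : s = pvCand i (v + F)
        · subst hs
          rw [PySem.Dict.get?_insert_self] at hw
          cases hw
          exact ⟨le_refl 1, fun j h1 h2 => absurd (lt_of_le_of_lt h1 h2) (by omega)⟩
        · rw [PySem.Dict.get?_insert_of_ne _ _ hs] at hw
          by_cases hsi : s = i
          · subst hsi
            rw [PySem.Dict.get?_insert_self] at hw
            cases hw
            refine ⟨by omega, ?_⟩
            intro j h1 h2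
            rw [hkeys2]
            by_cases hjv : j < v
            · exact List.mem_append_left _ (hvall j h1 hjv)
            · by_cases hjF : j < v + F
              · have he' : ((j - v).toNat : Int) = j - v := by omega
                have hlt2 : (j - v).toNat < F := by omega
                have := hmin _ hlt2
                rw [he'] at this
                have harg : v + (j - v) = j := by ring
                rw [harg] at this
                exact List.mem_append_left _ this
              · have : j = v + F := by omega
                subst this
                simp
          · rw [PySem.Dict.get?_insert_of_ne _ _ hsi, ho s hsi] at hw
            obtain ⟨h1, h2⟩ := hval s w hw
            refine ⟨h1, fun j hj1 hj2 => ?_⟩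
            rw [hkeys2]
            exact List.mem_append_left _ (h2 j hj1 hj2)

-- ===== VERDICT (by name: the statement is the Claim_ definition above) =====
theorem fileNaming_spec : Claim_equal_fileNaming := by
  intro names _
  unfold Spec_fileNaming fileNaming fileNaming_alt
  have hInv : pvDInv PySem.Dict.empty := by
    constructor
    · simp [PySem.Dict.keys, PySem.Dict.empty]
    · intro s v h
      simp [PySem.Dict.get?, PySem.Dict.empty] at h
  have := pv_main names [] PySem.Dict.empty hInv
  simpa [PySem.Dict.keys, PySem.Dict.empty, PySem.Set.empty] using this
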